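-- pv_equiv track=rewrite | github.com/emaanfatima118/Foresyte-backend | src/database/severity_logic.py | compute_invigilator_severity_from_count
-- ===== SOURCE A (Python) =====
-- from typing import Dict, List, Tuple, Optional, Any
--
-- INVIGILATOR_SEVERITY_CONFIG: Dict[str, List[Tuple[int, str]]] = {
--     "inv_out_of_classroom": [(1, "low"), (5, "medium"), (12, "high"), (25, "critical")],
--     "inv_sitting": [(1, "low"), (15, "medium"), (40, "high"), (80, "critical")],
--     "inv_standing": [(1, "low"), (4, "medium"), (10, "high"), (22, "critical")],
--     "inv_walking": [(1, "low"), (5, "medium"), (12, "high"), (28, "critical")],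
--     "inv_phone": [(1, "high"), (2, "critical")],
--     "inv_unknown": [(1, "low"), (4, "medium"), (8, "high"), (15, "critical")],
-- }
--
-- def _normalize_invigilator_type(activity_type: str) -> str:
--     """Map invigilator behavior labels to config keys (separate from student normalization)."""
--     if not activity_type or not isinstance(activity_type, str):
--         return "inv_unknown"
--     s = activity_type.strip().lower()
--     if ":" in s:
--         parts = s.rsplit(":", 2)
--         if len(parts) == 3 and all(p.strip().isdigit() for p in parts[-2:]):
--             s = parts[0].strip()
--     if "out" in s and "classroom" in s:
--         return "inv_out_of_classroom"
--     if s == "sitting":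
--         return "inv_sitting"
--     if s == "standing":
--         return "inv_standing"
--     if s == "walking":
--         return "inv_walking"
--     if s == "phone":
--         return "inv_phone"
--     return "inv_unknown"
--
-- def compute_invigilator_severity_from_count(count: int, activity_type: str) -> str:
--     """Severity for one invigilator run from consecutive frame count (same pattern as students)."""
--     if count < 1:
--         count = 1
--     key = _normalize_invigilator_type(activity_type)
--     thresholds = INVIGILATOR_SEVERITY_CONFIG.get(
--         key, INVIGILATOR_SEVERITY_CONFIG["inv_unknown"]
--     )
--     severity = "low"
--     for min_count, sev in thresholds:
--         if count >= min_count: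
--             severity = sev
--     return severity
-- ===== SOURCE B (Python) =====
-- import bisect
--
-- _ALT_CONFIG = {
--     "inv_out_of_classroom": [(1, "low"), (5, "medium"), (12, "high"), (25, "critical")],
--     "inv_sitting": [(1, "low"), (15, "medium"), (40, "high"), (80, "critical")],
--     "inv_standing": [(1, "low"), (4, "medium"), (10, "high"), (22, "critical")],
--     "inv_walking": [(1, "low"), (5, "medium"), (12, "high"), (28, "critical")],
--     "inv_phone": [(1, "high"), (2, "critical")],
--     "inv_unknown": [(1, "low"), (4, "medium"), (8, "high"), (15, "critical")],
-- }
--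
-- _EXACT = {
--     "sitting": "inv_sitting",
--     "standing": "inv_standing",
--     "walking": "inv_walking",
--     "phone": "inv_phone",
-- }
--
-- def _alt_key(activity_type):
--     if not activity_type:
--         return "inv_unknown"
--     s = activity_type.strip().lower()
--     if ":" in s:
--         pieces = s.split(":")
--         if len(pieces) >= 3 and pieces[-1].strip().isdigit() and pieces[-2].strip().isdigit():
--             s = ":".join(pieces[:-2]).strip()
--     if "out" in s and "classroom" in s:
--         return "inv_out_of_classroom"
--     return _EXACT.get(s, "inv_unknown")
--
-- def compute_invigilator_severity_from_count(count, activity_type):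
--     thresholds = _ALT_CONFIG[_alt_key(activity_type)]
--     keys = [mc for mc, _ in thresholds]
--     sevs = [sev for _, sev in thresholds]
--     return sevs[bisect.bisect_right(keys, max(count, 1)) - 1]
-- ===== Notes on version B (the rewrite author's own statement) =====
-- stated objective: idiomatic
-- what changed: B unzips the threshold table and selects the severity band with bisect.bisect_right instead of A's linear last-band-that-fires scan, and replaces A's rsplit plus if-cascade of exact labels with a full split and a dict lookup.
import Mathlib
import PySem

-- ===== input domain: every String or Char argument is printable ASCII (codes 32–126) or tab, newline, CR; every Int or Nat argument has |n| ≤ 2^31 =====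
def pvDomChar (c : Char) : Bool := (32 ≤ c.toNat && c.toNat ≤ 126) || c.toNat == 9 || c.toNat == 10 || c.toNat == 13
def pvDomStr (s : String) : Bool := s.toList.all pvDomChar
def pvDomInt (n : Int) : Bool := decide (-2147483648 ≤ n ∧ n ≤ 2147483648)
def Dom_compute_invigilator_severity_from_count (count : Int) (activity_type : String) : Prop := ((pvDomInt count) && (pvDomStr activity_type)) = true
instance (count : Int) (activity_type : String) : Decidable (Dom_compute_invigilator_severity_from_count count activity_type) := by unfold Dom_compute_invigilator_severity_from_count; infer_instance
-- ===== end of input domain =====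

-- B replaces A's linear last-band-that-fires scan over the threshold table by unzipping it and locating
-- the band with bisect_right, and A's if-cascade of exact labels by a dict lookup; same return value.

-- ===== PORT A =====

def pvConfig : PySem.Dict String (List (Int × String)) := PySem.Dict.mk
  [ ("inv_out_of_classroom", [(1, "low"), (5, "medium"), (12, "high"), (25, "critical")]),
    ("inv_sitting", [(1, "low"), (15, "medium"), (40, "high"), (80, "critical")]),
    ("inv_standing", [(1, "low"), (4, "medium"), (10, "high"), (22, "critical")]),
    ("inv_walking", [(1, "low"), (5, "medium"), (12, "high"), (28, "critical")]),
    ("inv_phone", [(1, "high"), (2, "critical")]),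
    ("inv_unknown", [(1, "low"), (4, "medium"), (8, "high"), (15, "critical")]) ]

-- s.rsplit(":", 2) ported by hand (PySem has no rsplit): split on every ":" and, when more than 3
-- pieces arise, re-join the head pieces; exact for the one-char separator ":" and maxsplit = 2.
def pvRsplitColon2 (s : List Char) : List (List Char) :=
  let ps := PySem.Chars.splitOn s [':']
  if ps.length ≤ 3 then ps
  else PySem.Chars.join [':'] (ps.take (ps.length - 2)) :: ps.drop (ps.length - 2)

-- the block 'if ":" in s: parts = s.rsplit(":", 2); if len(parts) == 3 and all(...): s = parts[0].strip()'
def pvColonA (s : List Char) : List Char :=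
  if PySem.Chars.isIn [':'] s then
    let parts := pvRsplitColon2 s
    if parts.length = 3 &&
        (PySem.List.slice parts (some (-2)) none).all
          (fun p => PySem.Chars.strIsdigit (PySem.Chars.strip p)) then
      PySem.Chars.strip (parts.headD [])   -- parts[0]; parts is never empty
    else s
  else s

-- the tail of _normalize_invigilator_type: the return cascade
def pvClassifyA (s : List Char) : String :=
  if PySem.Chars.isIn "out".toList s && PySem.Chars.isIn "classroom".toList s then "inv_out_of_classroom"
  else if s = "sitting".toList then "inv_sitting"
  else if s = "standing".toList then "inv_standing"
  else if s = "walking".toList then "inv_walking"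
  else if s = "phone".toList then "inv_phone"
  else "inv_unknown"

-- _normalize_invigilator_type (the isinstance test is always true for a str argument)
def pvNormalizeInvigilatorType (activity_type : String) : String :=
  if activity_type = "" then "inv_unknown"
  else pvClassifyA (pvColonA (PySem.Chars.lower (PySem.Chars.strip activity_type.toList)))

def compute_invigilator_severity_from_count (count : Int) (activity_type : String) : String :=
  let count := if count < 1 then 1 else count
  let key := pvNormalizeInvigilatorType activity_type
  -- config.get(key, config["inv_unknown"]); "inv_unknown" is a key of the literal dict, so the .getD [] is unreachable
  let thresholds := PySem.Dict.getD pvConfig key ((PySem.Dict.get? pvConfig "inv_unknown").getD [])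
  thresholds.foldl (fun severity p => if count ≥ p.1 then p.2 else severity) "low"

-- ===== PORT B =====

def pvAltConfig : PySem.Dict String (List (Int × String)) := PySem.Dict.mk
  [ ("inv_out_of_classroom", [(1, "low"), (5, "medium"), (12, "high"), (25, "critical")]),
    ("inv_sitting", [(1, "low"), (15, "medium"), (40, "high"), (80, "critical")]),
    ("inv_standing", [(1, "low"), (4, "medium"), (10, "high"), (22, "critical")]),
    ("inv_walking", [(1, "low"), (5, "medium"), (12, "high"), (28, "critical")]),
    ("inv_phone", [(1, "high"), (2, "critical")]),
    ("inv_unknown", [(1, "low"), (4, "medium"), (8, "high"), (15, "critical")]) ]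

def pvExactKeys : PySem.Dict String String := PySem.Dict.mk
  [ ("sitting", "inv_sitting"), ("standing", "inv_standing"),
    ("walking", "inv_walking"), ("phone", "inv_phone") ]

-- the block 'if ":" in s: pieces = s.split(":"); if len(pieces) >= 3 and ...: s = ":".join(pieces[:-2]).strip()'
def pvColonB (s : List Char) : List Char :=
  if PySem.Chars.isIn [':'] s then
    let pieces := PySem.Chars.splitOn s [':']
    if (3 ≤ pieces.length : Bool) &&
        PySem.Chars.strIsdigit (PySem.Chars.strip ((PySem.List.pyGet? pieces (-1)).getD [])) &&
        PySem.Chars.strIsdigit (PySem.Chars.strip ((PySem.List.pyGet? pieces (-2)).getD [])) then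
      PySem.Chars.strip (PySem.Chars.join [':'] (PySem.List.slice pieces none (some (-2))))
    else s
  else s

-- the tail of _alt_key: the out/classroom test, then _EXACT.get(s, "inv_unknown")
def pvClassifyB (s : List Char) : String :=
  if PySem.Chars.isIn "out".toList s && PySem.Chars.isIn "classroom".toList s then "inv_out_of_classroom"
  else PySem.Dict.getD pvExactKeys (String.ofList s) "inv_unknown"

def pvAltKey (activity_type : String) : String :=
  if activity_type = "" then "inv_unknown"
  else pvClassifyB (pvColonB (PySem.Chars.lower (PySem.Chars.strip activity_type.toList)))

def compute_invigilator_severity_from_count_alt (count : Int) (activity_type : String) : String :=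
  -- _ALT_CONFIG[key]: the key is always present, so the .getD [] is unreachable
  let thresholds := (PySem.Dict.get? pvAltConfig (pvAltKey activity_type)).getD []
  let keys := thresholds.map Prod.fst
  let sevs := thresholds.map Prod.snd
  -- sevs[bisect_right(keys, max(count, 1)) - 1]; the index is in range since keys[0] = 1 ≤ max(count, 1)
  (PySem.List.pyGet? sevs ((PySem.List.bisectRight keys (max count 1) : Int) - 1)).getD ""

-- ===== PRECONDITION & SPEC =====
def Spec_compute_invigilator_severity_from_count (count : Int) (activity_type : String) (out : String) : Prop := out = compute_invigilator_severity_from_count_alt count activity_type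
instance (count : Int) (activity_type : String) (out : String) : Decidable (Spec_compute_invigilator_severity_from_count count activity_type out) := by unfold Spec_compute_invigilator_severity_from_count; infer_instance

-- ===== CLAIM (what is proved, stated in full; the proofs are below) =====
def Claim_equal_compute_invigilator_severity_from_count : Prop := ∀ (count : Int) (activity_type : String), Dom_compute_invigilator_severity_from_count count activity_type → Spec_compute_invigilator_severity_from_count count activity_type (compute_invigilator_severity_from_count count activity_type)

-- ===== LEMMAS AND PROOFS =====

-- bisect_right on a sorted 4-element list, in closed form
theorem pvBisect4 (k1 k2 k3 k4 c : Int) (h12 : k1 ≤ k2) (h23 : k2 ≤ k3) (h34 : k3 ≤ k4) :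
    PySem.List.bisectRight [k1, k2, k3, k4] c
      = if c < k1 then 0 else if c < k2 then 1 else if c < k3 then 2 else if c < k4 then 3 else 4 := by
  obtain ⟨hle, hlt, hge⟩ := PySem.List.bisectRight_spec [k1, k2, k3, k4] c
    (by simp [List.pairwise_cons]; omega)
  set i := PySem.List.bisectRight [k1, k2, k3, k4] c with hi
  simp at hle
  have g0 := hlt 0 (by simp); have g1 := hlt 1 (by simp)
  have g2 := hlt 2 (by simp); have g3 := hlt 3 (by simp)
  have f0 := hge 0 (by simp); have f1 := hge 1 (by simp)
  have f2 := hge 2 (by simp); have f3 := hge 3 (by simp)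
  simp at g0 g1 g2 g3 f0 f1 f2 f3
  interval_cases i <;> split_ifs <;> omega

-- bisect_right on a sorted 2-element list, in closed form
theorem pvBisect2 (k1 k2 c : Int) (h12 : k1 ≤ k2) :
    PySem.List.bisectRight [k1, k2] c = if c < k1 then 0 else if c < k2 then 1 else 2 := by
  obtain ⟨hle, hlt, hge⟩ := PySem.List.bisectRight_spec [k1, k2] c
    (by simp [List.pairwise_cons]; omega)
  set i := PySem.List.bisectRight [k1, k2] c with hi
  simp at hle
  have g0 := hlt 0 (by simp); have g1 := hlt 1 (by simp)
  have f0 := hge 0 (by simp); have f1 := hge 1 (by simp)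
  simp at g0 g1 f0 f1
  interval_cases i <;> split_ifs <;> omega

-- A's last-band-that-fires scan equals B's bisect lookup, for one 4-band table
theorem pvBand4 (c k1 k2 k3 k4 : Int) (s1 s2 s3 s4 : String)
    (h1 : k1 ≤ c) (h12 : k1 ≤ k2) (h23 : k2 ≤ k3) (h34 : k3 ≤ k4) :
    ([(k1, s1), (k2, s2), (k3, s3), (k4, s4)]).foldl
        (fun severity p => if c ≥ p.1 then p.2 else severity) "low"
      = (PySem.List.pyGet? [s1, s2, s3, s4]
          ((PySem.List.bisectRight [k1, k2, k3, k4] c : Int) - 1)).getD "" := by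
  rw [pvBisect4 k1 k2 k3 k4 c h12 h23 h34]
  simp only [List.foldl]
  split_ifs <;> first | omega | simp [PySem.List.pyGet?, PySem.List.pyIdx?]

-- the same for the 2-band table
theorem pvBand2 (c k1 k2 : Int) (s1 s2 : String) (h1 : k1 ≤ c) (h12 : k1 ≤ k2) :
    ([(k1, s1), (k2, s2)]).foldl (fun severity p => if c ≥ p.1 then p.2 else severity) "low"
      = (PySem.List.pyGet? [s1, s2] ((PySem.List.bisectRight [k1, k2] c : Int) - 1)).getD "" := by
  rw [pvBisect2 k1 k2 c h12]
  simp only [List.foldl]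
  split_ifs <;> first | omega | simp [PySem.List.pyGet?, PySem.List.pyIdx?]

-- the colon-stripping step: A's rsplit-based form equals B's split-based form
theorem pvColon_eq (s : List Char) : pvColonA s = pvColonB s := by
  unfold pvColonA pvColonB pvRsplitColon2
  by_cases hc : PySem.Chars.isIn [':'] s
  · simp only [hc, if_true]
    generalize PySem.Chars.splitOn s [':'] = pieces
    by_cases h3 : pieces.length ≤ 3
    · simp only [if_pos h3]
      by_cases he : pieces.length = 3
      · obtain ⟨a, b, c, rfl⟩ := List.length_eq_three.mp he
        simp [PySem.List.slice, PySem.List.pyGet?, PySem.List.pyIdx?, and_comm]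
      · have hlt : ¬ (3 : Nat) ≤ pieces.length := by omega
        simp [he, hlt]
    · simp only [if_neg h3]
      push_neg at h3
      obtain ⟨l1, y, rfl⟩ : ∃ l' b, pieces = l' ++ [b] := by
        rcases List.eq_nil_or_concat pieces with rfl | ⟨l', b, h⟩
        · simp at h3
        · exact ⟨l', b, by simpa [List.concat_eq_append] using h⟩
      obtain ⟨l, x, rfl⟩ : ∃ l' b, l1 = l' ++ [b] := by
        rcases List.eq_nil_or_concat l1 with rfl | ⟨l', b, h⟩
        · simp at h3
        · exact ⟨l', b, by simpa [List.concat_eq_append] using h⟩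
      rw [List.append_assoc]
      simp only [List.length_append, List.length_cons, List.length_nil] at h3
      set p := l ++ ([x] ++ [y]) with hpd
      have hlen : p.length = l.length + 2 := by simp [hpd]
      have htk : p.take (p.length - 2) = l := by
        rw [hlen]; simpa [hpd] using List.take_left (l₁ := l) (l₂ := [x] ++ [y])
      have hdr : p.drop (p.length - 2) = [x, y] := by
        rw [hlen]; simpa [hpd] using List.drop_left (l₁ := l) (l₂ := [x] ++ [y])
      have hlp : 4 ≤ p.length := by rw [hlen]; omega
      have h3t : (decide (3 ≤ p.length)) = true := by rw [hlen]; simp; omega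
      rw [htk, hdr]
      have hsl : PySem.List.slice
          (PySem.Chars.join [':'] l :: [x, y]) (some (-2)) none = [x, y] := by
        rw [PySem.List.slice_from_neg_ofNat _ 2 (by omega)]; simp
      have hg1 : (PySem.List.pyGet? p (-1)).getD [] = y := by
        rw [PySem.List.pyGet?_neg_one]; simp [hpd]
      have hg2 : (PySem.List.pyGet? p (-2)).getD [] = x := by
        rw [PySem.List.pyGet?_neg_ofNat p 2 (by omega) (by omega)]
        rw [hlen]
        simp [hpd, List.getElem?_append_right]
      have hsl2 : PySem.List.slice p none (some (-2)) = l := by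
        rw [PySem.List.slice_to_neg_ofNat p 2 (by omega)]; exact htk
      rw [hsl, hg1, hg2, hsl2]
      cases hx : PySem.Chars.strIsdigit (PySem.Chars.strip x) <;>
        cases hy : PySem.Chars.strIsdigit (PySem.Chars.strip y) <;>
          simp [hx, hy, h3t]
  · simp [hc]

-- string-equality test against a string built from a char list, as list equality
theorem pvBeq_ofList (t : String) (s : List Char) :
    (t == String.ofList s) = decide (s = t.toList) := by
  by_cases h : s = t.toList
  · subst h; simp
  · have hne : t ≠ String.ofList s := by
      intro he; exact h (by rw [he, String.toList_ofList])
    simp [h, hne]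

-- the if-cascade of exact labels equals B's dict lookup
theorem pvClassify_eq (s : List Char) : pvClassifyA s = pvClassifyB s := by
  unfold pvClassifyA pvClassifyB
  cases ho : (PySem.Chars.isIn "out".toList s && PySem.Chars.isIn "classroom".toList s)
  · simp only [ho, Bool.false_eq_true, if_false]
    simp only [pvExactKeys, PySem.Dict.getD, PySem.Dict.get?, List.find?, pvBeq_ofList]
    by_cases h1 : s = "sitting".toList
    · simp_all
    · by_cases h2 : s = "standing".toList
      · simp_all
      · by_cases h3 : s = "walking".toList
        · simp_all
        · by_cases h4 : s = "phone".toList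
          · simp_all
          · simp_all
  · simp [ho]

-- the two key-normalisation helpers agree
theorem pvKey_eq (activity_type : String) :
    pvNormalizeInvigilatorType activity_type = pvAltKey activity_type := by
  unfold pvNormalizeInvigilatorType pvAltKey
  by_cases hat : activity_type = ""
  · simp [hat]
  · rw [if_neg hat, if_neg hat, pvColon_eq, pvClassify_eq]

-- B's classification tail only produces config keys
theorem pvClassifyB_mem (s : List Char) :
    pvClassifyB s = "inv_out_of_classroom" ∨ pvClassifyB s = "inv_sitting" ∨
    pvClassifyB s = "inv_standing" ∨ pvClassifyB s = "inv_walking" ∨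
    pvClassifyB s = "inv_phone" ∨ pvClassifyB s = "inv_unknown" := by
  unfold pvClassifyB
  cases ho : (PySem.Chars.isIn "out".toList s && PySem.Chars.isIn "classroom".toList s)
  · simp only [ho, Bool.false_eq_true, if_false]
    simp only [pvExactKeys, PySem.Dict.getD, PySem.Dict.get?, List.find?, pvBeq_ofList]
    by_cases h1 : s = "sitting".toList
    · simp_all
    · by_cases h2 : s = "standing".toList
      · simp_all
      · by_cases h3 : s = "walking".toList
        · simp_all
        · by_cases h4 : s = "phone".toList
          · simp_all
          · simp_all
  · simp [ho]

-- B's key is always one of the six config keys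
theorem pvAltKey_mem (activity_type : String) :
    pvAltKey activity_type = "inv_out_of_classroom" ∨ pvAltKey activity_type = "inv_sitting" ∨
    pvAltKey activity_type = "inv_standing" ∨ pvAltKey activity_type = "inv_walking" ∨
    pvAltKey activity_type = "inv_phone" ∨ pvAltKey activity_type = "inv_unknown" := by
  unfold pvAltKey
  by_cases hat : activity_type = ""
  · simp [hat]
  · rw [if_neg hat]
    exact pvClassifyB_mem _

-- ===== VERDICT (by name: the statement is the Claim_ definition above) =====
theorem compute_invigilator_severity_from_count_spec : Claim_equal_compute_invigilator_severity_from_count := by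
  intro count activity_type _
  unfold Spec_compute_invigilator_severity_from_count
  unfold compute_invigilator_severity_from_count compute_invigilator_severity_from_count_alt
  rw [pvKey_eq]
  have hclamp : (if count < 1 then 1 else count) = max count 1 := by split_ifs <;> omega
  rw [hclamp]
  have hmax : (1 : Int) ≤ max count 1 := le_max_right count 1
  rcases pvAltKey_mem activity_type with h | h | h | h | h | h <;> rw [h] <;>
    first
      | exact pvBand4 (max count 1) 1 5 12 25 "low" "medium" "high" "critical"
          hmax (by norm_num) (by norm_num) (by norm_num)
      | exact pvBand4 (max count 1) 1 15 40 80 "low" "medium" "high" "critical"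
          hmax (by norm_num) (by norm_num) (by norm_num)
      | exact pvBand4 (max count 1) 1 4 10 22 "low" "medium" "high" "critical"
          hmax (by norm_num) (by norm_num) (by norm_num)
      | exact pvBand4 (max count 1) 1 5 12 28 "low" "medium" "high" "critical"
          hmax (by norm_num) (by norm_num) (by norm_num)
      | exact pvBand2 (max count 1) 1 2 "high" "critical" hmax (by norm_num)
      | exact pvBand4 (max count 1) 1 4 8 15 "low" "medium" "high" "critical"
          hmax (by norm_num) (by norm_num) (by norm_num)
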